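-- pv_equiv track=rewrite | github.com/MarioCDiazE/consolidacion3 | separar_nombres.py | separar_grupos
-- ===== SOURCE A (Python) =====
-- def separar_grupos(nombres):
--     magos = []
--     cientificos = []
--     otros = []
--
--     for nombre in nombres:
--         if nombre in ['Harry Houdini', 'David Blaine', 'Teller']:
--             magos.append(nombre)
--         elif nombre in ['Newton', 'Hawking', 'Einstein']:
--             cientificos.append(nombre)
--         else:
--             otros.append(nombre)
--
--     return magos, cientificos, otros
-- ===== SOURCE B (Python) =====
-- MAGOS = {'Harry Houdini', 'David Blaine', 'Teller'}
-- CIENTIFICOS = {'Newton', 'Hawking', 'Einstein'}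
--
-- def separar_grupos(nombres):
--     magos = [n for n in nombres if n in MAGOS]
--     cientificos = [n for n in nombres if n in CIENTIFICOS]
--     otros = [n for n in nombres if n not in MAGOS and n not in CIENTIFICOS]
--     return magos, cientificos, otros
-- ===== Notes on version B (the rewrite author's own statement) =====
-- stated objective: idiomatic
-- what changed: Replaces the single interleaved dispatch loop with three independent filtered passes (list comprehensions) over the input, one per output group.
import Mathlib
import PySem

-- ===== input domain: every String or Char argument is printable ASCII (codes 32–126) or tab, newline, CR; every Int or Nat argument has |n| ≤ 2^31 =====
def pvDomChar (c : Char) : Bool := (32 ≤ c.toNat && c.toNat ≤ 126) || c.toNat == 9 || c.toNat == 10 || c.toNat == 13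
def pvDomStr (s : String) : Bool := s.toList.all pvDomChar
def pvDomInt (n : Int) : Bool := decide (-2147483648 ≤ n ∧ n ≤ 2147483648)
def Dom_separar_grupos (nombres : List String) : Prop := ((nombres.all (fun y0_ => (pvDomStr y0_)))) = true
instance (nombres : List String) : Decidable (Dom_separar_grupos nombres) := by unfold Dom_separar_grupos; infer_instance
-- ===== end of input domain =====

-- ===== PORT A =====
-- fold over the input carrying (magos, cientificos, otros), as A's single loop does
def separar_grupos (nombres : List String) : List String × List String × List String :=
  nombres.foldl (fun st nombre =>
    if nombre ∈ ["Harry Houdini", "David Blaine", "Teller"] then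
      (st.1 ++ [nombre], st.2.1, st.2.2)
    else if nombre ∈ ["Newton", "Hawking", "Einstein"] then
      (st.1, st.2.1 ++ [nombre], st.2.2)
    else
      (st.1, st.2.1, st.2.2 ++ [nombre])) ([], [], [])

-- ===== PORT B =====
-- B: three independent filtered passes over the input (one comprehension per group); idiomatic decomposition, same cost
def pvMagos : PySem.Set String := PySem.Set.ofList ["Harry Houdini", "David Blaine", "Teller"]
def pvCientificos : PySem.Set String := PySem.Set.ofList ["Newton", "Hawking", "Einstein"]

def separar_grupos_alt (nombres : List String) : List String × List String × List String :=
  (nombres.filter (fun n => n ∈ pvMagos),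
   nombres.filter (fun n => n ∈ pvCientificos),
   nombres.filter (fun n => ¬ n ∈ pvMagos ∧ ¬ n ∈ pvCientificos))

-- ===== PRECONDITION & SPEC =====
def Spec_separar_grupos (nombres : List String) (out : List String × List String × List String) : Prop := out = separar_grupos_alt nombres
instance (nombres : List String) (out : List String × List String × List String) : Decidable (Spec_separar_grupos nombres out) := by unfold Spec_separar_grupos; infer_instance

-- ===== CLAIM (what is proved, stated in full; the proofs are below) =====
def Claim_equal_separar_grupos : Prop := ∀ (nombres : List String), Dom_separar_grupos nombres → Spec_separar_grupos nombres (separar_grupos nombres)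

-- ===== LEMMAS AND PROOFS =====
theorem pvMagos_eq : pvMagos = ["Harry Houdini", "David Blaine", "Teller"] := by decide
theorem pvCientificos_eq : pvCientificos = ["Newton", "Hawking", "Einstein"] := by decide

-- invariant of A's fold: continuing from accumulated state appends the three filters of the rest
theorem separar_grupos_foldl (nombres : List String) (m c o : List String) :
    nombres.foldl (fun st nombre =>
      if nombre ∈ ["Harry Houdini", "David Blaine", "Teller"] then
        (st.1 ++ [nombre], st.2.1, st.2.2)
      else if nombre ∈ ["Newton", "Hawking", "Einstein"] then
        (st.1, st.2.1 ++ [nombre], st.2.2)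
      else
        (st.1, st.2.1, st.2.2 ++ [nombre])) (m, c, o)
    = (m ++ nombres.filter (fun n => n ∈ pvMagos),
       c ++ nombres.filter (fun n => n ∈ pvCientificos),
       o ++ nombres.filter (fun n => ¬ n ∈ pvMagos ∧ ¬ n ∈ pvCientificos)) := by
  induction nombres generalizing m c o with
  | nil => simp
  | cons x xs ih =>
    simp only [List.foldl_cons, List.filter_cons, pvMagos_eq, pvCientificos_eq]
    by_cases hm : x ∈ (["Harry Houdini", "David Blaine", "Teller"] : List String)
    · rw [if_pos hm, ih]
      simp only [List.mem_cons, List.not_mem_nil, or_false] at hm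
      rcases hm with h|h|h <;> subst h <;> simp [pvMagos_eq, pvCientificos_eq]
    · rw [if_neg hm]
      by_cases hc : x ∈ (["Newton", "Hawking", "Einstein"] : List String)
      · rw [if_pos hc, ih]
        simp [pvMagos_eq, pvCientificos_eq, hm, hc]
      · rw [if_neg hc, ih]
        simp [pvMagos_eq, pvCientificos_eq, hm, hc]

-- ===== VERDICT (by name: the statement is the Claim_ definition above) =====
theorem separar_grupos_spec : Claim_equal_separar_grupos := by
  intro nombres _
  unfold Spec_separar_grupos separar_grupos separar_grupos_alt
  rw [separar_grupos_foldl]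
  simp
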